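-- pv_equiv track=rewrite | github.com/piercecunneen/HockeyStatisticsApp | TeamSearch.py | TeamSearch
-- ===== SOURCE A (Python) =====
-- def TeamSearch(search):
--     # Takes in a search query and returns either an exact match or a list of partial matches
--     TeamNames = {'Anaheim Ducks': 1, 'Arizona Coyotes':23, 'Boston Bruins':3,
--             'Buffalo Sabres': 4, 'Carolina Hurricanes':5, 'Calgary Flames':6, 'Chicago Blackhawks':7,
--             'Colorodo Avalanche':9, 'Columbus Blue jackets':8, 'Dallas Stats':10, 'Detroit Redwings':11,
--             'Edmonton Oilers':12, 'Florida Panthers':13, 'Los Angeles Kings':14,  'Minnesota Stars':15,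
--             'Montreal Canadiens':16, 'Nashville Predators':17, 'New Jersey Devils':18, 'New York Islanders':19,
--             'New York Rangers':20, 'Ottawa Senators':21, 'Philadelphia Flyers':22, 'Pittsburgh Penguins':24, 'San Jose Sharks':25,
--             'St. Louis Blues':26, 'Tampa Bay Lightening':27, 'Toronto Redwings':28, 'Vancouver Canucks':29, 'Washington Capitals':30, 'Winnipeg Jets':2}
--
--     Partial_Matches = {}
--     Exact_Matches = {}
--     search = search.lower()
--
--     #
--     for team in TeamNames:
--         if team.lower() == search:
--             Exact_Matches[team] = TeamNames[team]
--             return Exact_Matches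
--         name = team.lower()
--         search_list = search.split()
--         for query in search_list:
--             if query in name:
--                 if query != 'new' or len(search_list) == 1:
--                     Partial_Matches[team] = TeamNames[team]
--                     break
--
--     if len(Partial_Matches) >0:
--         return Partial_Matches
--     else:
--         return None
-- ===== SOURCE B (Python) =====
-- def TeamSearch(search):
--     # Two separate passes: an exact-match scan, then a comprehension for partial matches.
--     TeamNames = [('Anaheim Ducks', 1), ('Arizona Coyotes', 23), ('Boston Bruins', 3),
--                  ('Buffalo Sabres', 4), ('Carolina Hurricanes', 5), ('Calgary Flames', 6),
--                  ('Chicago Blackhawks', 7), ('Colorodo Avalanche', 9), ('Columbus Blue jackets', 8),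
--                  ('Dallas Stats', 10), ('Detroit Redwings', 11), ('Edmonton Oilers', 12),
--                  ('Florida Panthers', 13), ('Los Angeles Kings', 14), ('Minnesota Stars', 15),
--                  ('Montreal Canadiens', 16), ('Nashville Predators', 17), ('New Jersey Devils', 18),
--                  ('New York Islanders', 19), ('New York Rangers', 20), ('Ottawa Senators', 21),
--                  ('Philadelphia Flyers', 22), ('Pittsburgh Penguins', 24), ('San Jose Sharks', 25),
--                  ('St. Louis Blues', 26), ('Tampa Bay Lightening', 27), ('Toronto Redwings', 28),
--                  ('Vancouver Canucks', 29), ('Washington Capitals', 30), ('Winnipeg Jets', 2)]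
--     s = search.lower()
--     for team, tid in TeamNames:
--         if team.lower() == s:
--             return {team: tid}
--     words = s.split()
--     single = len(words) == 1
--     partial = {team: tid for team, tid in TeamNames
--                if any(q in team.lower() and (q != 'new' or single) for q in words)}
--     return partial if partial else None
-- ===== Notes on version B (the rewrite author's own statement) =====
-- stated objective: alternative
-- what changed: B splits A's single interleaved loop into two separate passes: an early-exit exact-match scan over the pair list, then a comprehension (filter with any) building all partial matches at once; the query is split into words once instead of once per team inside A's loop.
import Mathlib
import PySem

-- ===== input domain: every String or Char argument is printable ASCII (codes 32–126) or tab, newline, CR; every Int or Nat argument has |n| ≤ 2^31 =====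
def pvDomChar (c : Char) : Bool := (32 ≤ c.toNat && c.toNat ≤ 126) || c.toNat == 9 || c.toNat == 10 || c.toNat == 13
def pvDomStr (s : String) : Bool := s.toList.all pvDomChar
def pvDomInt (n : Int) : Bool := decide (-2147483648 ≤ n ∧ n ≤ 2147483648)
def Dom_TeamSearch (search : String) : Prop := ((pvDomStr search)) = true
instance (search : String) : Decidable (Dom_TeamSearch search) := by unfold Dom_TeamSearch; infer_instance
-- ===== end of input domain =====

-- B replaces A's single interleaved loop by an exact-match pass followed by a filter pass (alternative decomposition, same cost).

-- ===== PORT A =====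
def teamNamesA : PySem.Dict String Int := PySem.Dict.ofList
  [("Anaheim Ducks", 1), ("Arizona Coyotes", 23), ("Boston Bruins", 3),
   ("Buffalo Sabres", 4), ("Carolina Hurricanes", 5), ("Calgary Flames", 6),
   ("Chicago Blackhawks", 7), ("Colorodo Avalanche", 9), ("Columbus Blue jackets", 8),
   ("Dallas Stats", 10), ("Detroit Redwings", 11), ("Edmonton Oilers", 12),
   ("Florida Panthers", 13), ("Los Angeles Kings", 14), ("Minnesota Stars", 15),
   ("Montreal Canadiens", 16), ("Nashville Predators", 17), ("New Jersey Devils", 18),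
   ("New York Islanders", 19), ("New York Rangers", 20), ("Ottawa Senators", 21),
   ("Philadelphia Flyers", 22), ("Pittsburgh Penguins", 24), ("San Jose Sharks", 25),
   ("St. Louis Blues", 26), ("Tampa Bay Lightening", 27), ("Toronto Redwings", 28),
   ("Vancouver Canucks", 29), ("Washington Capitals", 30), ("Winnipeg Jets", 2)]

-- the inner 'for query in search_list' loop: break (after inserting) when the guard passes
def innerLoopA (team name : String) (searchList : List String) (qs : List String)
    (pm : PySem.Dict String Int) : PySem.Dict String Int :=
  match qs with
  | [] => pm
  | q :: rest =>
      if PySem.Str.isIn q name then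
        if q != "new" || searchList.length == 1 then
          pm.insert team (teamNamesA.getD team 0)
        else innerLoopA team name searchList rest pm
      else innerLoopA team name searchList rest pm

-- the outer 'for team in TeamNames' loop with the early exact-match return,
-- followed by the 'len(Partial_Matches) > 0' check
def teamLoopA (search : String) (keys : List String) (pm : PySem.Dict String Int) :
    Option (List (String × Int)) :=
  match keys with
  | [] => if pm.size > 0 then some pm.items else none
  | team :: rest =>
      if PySem.Str.lower team == search then
        some ((PySem.Dict.empty.insert team (teamNamesA.getD team 0)).items)
      else
        let name := PySem.Str.lower team
        let searchList := PySem.Str.split₀ search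
        teamLoopA search rest (innerLoopA team name searchList searchList pm)

def TeamSearch (search : String) : Option (List (String × Int)) :=
  teamLoopA (PySem.Str.lower search) teamNamesA.keys PySem.Dict.empty

-- ===== PORT B =====
def teamPairsB : List (String × Int) :=
  [("Anaheim Ducks", 1), ("Arizona Coyotes", 23), ("Boston Bruins", 3),
   ("Buffalo Sabres", 4), ("Carolina Hurricanes", 5), ("Calgary Flames", 6),
   ("Chicago Blackhawks", 7), ("Colorodo Avalanche", 9), ("Columbus Blue jackets", 8),
   ("Dallas Stats", 10), ("Detroit Redwings", 11), ("Edmonton Oilers", 12),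
   ("Florida Panthers", 13), ("Los Angeles Kings", 14), ("Minnesota Stars", 15),
   ("Montreal Canadiens", 16), ("Nashville Predators", 17), ("New Jersey Devils", 18),
   ("New York Islanders", 19), ("New York Rangers", 20), ("Ottawa Senators", 21),
   ("Philadelphia Flyers", 22), ("Pittsburgh Penguins", 24), ("San Jose Sharks", 25),
   ("St. Louis Blues", 26), ("Tampa Bay Lightening", 27), ("Toronto Redwings", 28),
   ("Vancouver Canucks", 29), ("Washington Capitals", 30), ("Winnipeg Jets", 2)]

-- first pass: exact lowercased match, early return
def findExactB (s : String) : List (String × Int) → Option (List (String × Int))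
  | [] => none
  | (team, tid) :: rest =>
      if PySem.Str.lower team == s then some [(team, tid)] else findExactB s rest

def TeamSearch_alt (search : String) : Option (List (String × Int)) :=
  let s := PySem.Str.lower search
  match findExactB s teamPairsB with
  | some r => some r
  | none =>
      let words := PySem.Str.split₀ s
      let single : Bool := words.length == 1
      let part := teamPairsB.filter (fun p =>
        words.any (fun q => PySem.Str.isIn q (PySem.Str.lower p.1) && (q != "new" || single)))
      if part.isEmpty then none else some part

-- ===== PRECONDITION & SPEC =====
def Spec_TeamSearch (search : String) (out : Option (List (String × Int))) : Prop := out = TeamSearch_alt search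
instance (search : String) (out : Option (List (String × Int))) : Decidable (Spec_TeamSearch search out) := by unfold Spec_TeamSearch; infer_instance

-- ===== CLAIM (what is proved, stated in full; the proofs are below) =====
def Claim_equal_TeamSearch : Prop := ∀ (search : String), Dom_TeamSearch search → Spec_TeamSearch search (TeamSearch search)

-- ===== LEMMAS AND PROOFS =====

theorem inner_eq (team name : String) (sl qs : List String) (pm : PySem.Dict String Int) :
    innerLoopA team name sl qs pm =
      if qs.any (fun q => PySem.Str.isIn q name && (q != "new" || sl.length == 1)) then
        pm.insert team (teamNamesA.getD team 0)
      else pm := by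
  induction qs with
  | nil => simp [innerLoopA]
  | cons q rest ih =>
      simp only [innerLoopA, List.any_cons]
      by_cases h1 : PySem.Str.isIn q name = true
      · rw [if_pos h1]
        simp only [PySem.Str.isIn_eq] at h1
        by_cases h2 : (q != "new" || sl.length == 1) = true
        · rw [if_pos h2]
          simp at h2
          simp [h1, h2]
        · rw [if_neg h2, ih]
          simp at h2
          simp [h1, h2]
      · rw [if_neg h1, ih]
        simp only [PySem.Str.isIn_eq] at h1
        simp at h1
        simp [h1]

theorem loop_eq (s : String) (pairs : List (String × Int)) (pm : PySem.Dict String Int)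
    (hv : ∀ p ∈ pairs, teamNamesA.getD p.1 0 = p.2)
    (hfresh : ∀ p ∈ pairs, pm.contains p.1 = false)
    (hnd : (pairs.map Prod.fst).Nodup) :
    teamLoopA s (pairs.map Prod.fst) pm =
      match findExactB s pairs with
      | some r => some r
      | none =>
          if (pm.items ++ pairs.filter (fun p => (PySem.Str.split₀ s).any fun q =>
                PySem.Str.isIn q (PySem.Str.lower p.1) &&
                  (q != "new" || (PySem.Str.split₀ s).length == 1))).length > 0 then
            some (pm.items ++ pairs.filter (fun p => (PySem.Str.split₀ s).any fun q =>
                PySem.Str.isIn q (PySem.Str.lower p.1) &&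
                  (q != "new" || (PySem.Str.split₀ s).length == 1)))
          else none := by
  induction pairs generalizing pm with
  | nil =>
      simp only [List.map_nil, teamLoopA, findExactB, List.filter_nil, List.append_nil]
      simp [PySem.Dict.size]
  | cons p rest ih =>
      obtain ⟨t, v⟩ := p
      simp only [List.map_cons] at hnd ⊢
      have hvt : teamNamesA.getD t 0 = v := hv (t, v) (List.mem_cons_self ..)
      by_cases hex : PySem.Str.lower t == s
      · simp only [teamLoopA, findExactB, hex, if_pos]
        rw [PySem.Dict.items_insert_of_not_contains _ _ (PySem.Dict.contains_empty _), hvt]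
        rfl
      · simp only [teamLoopA, findExactB, hex, if_neg, Bool.false_eq_true, not_false_iff]
        have hft : pm.contains t = false := hfresh (t, v) (List.mem_cons_self ..)
        rw [inner_eq]
        have hrest_v : ∀ p ∈ rest, teamNamesA.getD p.1 0 = p.2 :=
          fun p hp => hv p (List.mem_cons_of_mem _ hp)
        have hnd' := List.nodup_cons.mp hnd
        by_cases hc : ((PySem.Str.split₀ s).any fun q =>
            PySem.Str.isIn q (PySem.Str.lower t) &&
              (q != "new" || (PySem.Str.split₀ s).length == 1)) = true
        · rw [if_pos hc]
          rw [ih (pm.insert t (teamNamesA.getD t 0)) hrest_v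
              (fun p hp => by
                rw [PySem.Dict.contains_insert]
                have h1 : pm.contains p.1 = false := hfresh p (List.mem_cons_of_mem _ hp)
                have h2 : p.1 ≠ t := fun h => hnd'.1 (h ▸ List.mem_map_of_mem hp)
                simp [h1]
                exact fun h => absurd h h2)
              hnd'.2]
          cases hfe : findExactB s rest with
          | some r => rfl
          | none =>
              rw [PySem.Dict.items_insert_of_not_contains _ _ hft, hvt]
              have hfil : List.filter (fun p => (PySem.Str.split₀ s).any fun q =>
                    PySem.Str.isIn q (PySem.Str.lower p.1) &&
                      (q != "new" || (PySem.Str.split₀ s).length == 1))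
                  ((t, v) :: rest) =
                  (t, v) :: List.filter (fun p => (PySem.Str.split₀ s).any fun q =>
                    PySem.Str.isIn q (PySem.Str.lower p.1) &&
                      (q != "new" || (PySem.Str.split₀ s).length == 1)) rest :=
                List.filter_cons_of_pos hc
              rw [hfil, List.append_assoc, List.singleton_append]
        · rw [if_neg hc,
            ih pm hrest_v (fun p hp => hfresh p (List.mem_cons_of_mem _ hp)) hnd'.2]
          cases hfe : findExactB s rest with
          | some r => rfl
          | none =>
              have hfil : List.filter (fun p => (PySem.Str.split₀ s).any fun q =>
                    PySem.Str.isIn q (PySem.Str.lower p.1) &&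
                      (q != "new" || (PySem.Str.split₀ s).length == 1))
                  ((t, v) :: rest) =
                  List.filter (fun p => (PySem.Str.split₀ s).any fun q =>
                    PySem.Str.isIn q (PySem.Str.lower p.1) &&
                      (q != "new" || (PySem.Str.split₀ s).length == 1)) rest :=
                List.filter_cons_of_neg (by simpa using hc)
              rw [hfil]

theorem keys_eq : teamNamesA.keys = teamPairsB.map Prod.fst := by decide

theorem vals_ok : ∀ p ∈ teamPairsB, teamNamesA.getD p.1 0 = p.2 := by decide

theorem nd_ok : (teamPairsB.map Prod.fst).Nodup := by decide

-- ===== VERDICT (by name: the statement is the Claim_ definition above) =====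
theorem TeamSearch_spec : Claim_equal_TeamSearch := by
  intro search _
  unfold Spec_TeamSearch TeamSearch
  rw [keys_eq, loop_eq _ _ _ vals_ok (fun p _ => PySem.Dict.contains_empty _) nd_ok]
  show _ = TeamSearch_alt search
  unfold TeamSearch_alt
  cases hfe : findExactB (PySem.Str.lower search) teamPairsB with
  | some r => simp [hfe]
  | none =>
      simp only [hfe]
      have he : (PySem.Dict.empty : PySem.Dict String Int).items = [] := rfl
      rw [he, List.nil_append]
      generalize List.filter _ teamPairsB = L
      cases L <;> simp
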